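-- pv_equiv track=rewrite | github.com/KikoPavan/juridico-cli | agents/evidence-agent/main.py | _normalize_evidencias
-- ===== SOURCE A (Python) =====
-- from typing import Any, Dict, Tuple
--
-- def _normalize_evidencias(evs: Any) -> list:
--     out = []
--     if not isinstance(evs, list):
--         return out
--     for ev in evs:
--         if not isinstance(ev, dict):
--             continue
--         fonte = (
--             ev.get("fonte")
--             or ev.get("source")
--             or ev.get("ref")
--             or ev.get("arquivo")
--             or ""
--         )
--         trecho = (
--             ev.get("trecho")
--             or ev.get("text")
--             or ev.get("excerpt")
--             or ev.get("fragmento")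
--             or ""
--         )
--         obs = (
--             ev.get("observacao")
--             or ev.get("note")
--             or ev.get("comentario")
--             or ev.get("why")
--             or ""
--         )
--         out.append(
--             {
--                 "fonte": str(fonte) if fonte is not None else "",
--                 "trecho": str(trecho) if trecho is not None else "",
--                 "observacao": str(obs) if obs is not None else "",
--             }
--         )
--     return out
-- ===== SOURCE B (Python) =====
-- # B: inverted-index single pass.  A probes each output field's candidate keys in
-- # priority order with repeated .get() calls; B instead scans the dict's items ONCE,
-- # maps each key through an inverted priority index (key -> (field, rank)) and keeps
-- # a running minimum-rank candidate per field.  Correct because each field's ranks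
-- # are distinct, so the arg-min over the items equals the first truthy candidate in
-- # priority order.
--
-- _PRIO = {
--     "fonte": ("fonte", 0), "source": ("fonte", 1), "ref": ("fonte", 2), "arquivo": ("fonte", 3),
--     "trecho": ("trecho", 0), "text": ("trecho", 1), "excerpt": ("trecho", 2), "fragmento": ("trecho", 3),
--     "observacao": ("observacao", 0), "note": ("observacao", 1), "comentario": ("observacao", 2), "why": ("observacao", 3),
-- }
--
--
-- def _normalize_evidencias(evs):
--     if not isinstance(evs, list):
--         return []
--     out = []
--     for ev in evs:
--         if not isinstance(ev, dict):
--             continue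
--         best = {}  # field -> (rank, value)
--         for k, v in ev.items():
--             hit = _PRIO.get(k)
--             if hit is None or not v:
--                 continue
--             field, rank = hit
--             cur = best.get(field)
--             if cur is None or rank < cur[0]:
--                 best[field] = (rank, str(v))
--         out.append({f: best[f][1] if f in best else "" for f in ("fonte", "trecho", "observacao")})
--     return out
-- ===== Notes on version B (the rewrite author's own statement) =====
-- stated objective: alternative
-- what changed: Replaces A's per-field ordered fallback .get() probes by a single pass over each dict's items through an inverted priority index (key -> (field, rank)), keeping a running minimum-rank candidate per field.
import Mathlib
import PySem

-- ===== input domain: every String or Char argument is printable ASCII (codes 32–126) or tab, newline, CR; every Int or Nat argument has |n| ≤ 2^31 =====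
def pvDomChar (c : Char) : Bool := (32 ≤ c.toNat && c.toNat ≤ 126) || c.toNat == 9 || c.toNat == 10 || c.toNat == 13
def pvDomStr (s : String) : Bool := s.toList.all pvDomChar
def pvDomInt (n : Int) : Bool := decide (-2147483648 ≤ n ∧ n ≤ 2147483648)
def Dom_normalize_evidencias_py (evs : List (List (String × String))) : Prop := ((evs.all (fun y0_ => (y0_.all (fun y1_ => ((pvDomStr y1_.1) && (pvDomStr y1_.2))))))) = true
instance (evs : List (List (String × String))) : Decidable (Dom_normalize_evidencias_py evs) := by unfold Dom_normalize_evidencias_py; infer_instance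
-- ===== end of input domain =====

-- B replaces A's per-field ordered fallback .get() probes by ONE pass over each dict's
-- items through an inverted priority index (key -> (field, rank)), keeping a running
-- minimum-rank candidate per field (objective: alternative, same cost).
-- Under the type convention evs : List (List (String × String)), so the isinstance
-- guards of both Pythons are always true and are not ported.

-- ===== PORT A =====
-- ev.get(k): first-match lookup in the association list (Python dict get)
def pvGetA (ev : List (String × String)) (k : String) : Option String :=
  (PySem.Dict.mk ev).get? k

-- Python's `x or y` for x an optional string (None and "" are falsy)
def pvOrStr (o : Option String) (els : String) : String :=
  match o with
  | some v => if v = "" then els else v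
  | none => els

def normalize_evidencias_py (evs : List (List (String × String))) : List (List (String × String)) :=
  evs.foldl
    (fun out ev =>
      let fonte := pvOrStr (pvGetA ev "fonte") (pvOrStr (pvGetA ev "source")
                     (pvOrStr (pvGetA ev "ref") (pvOrStr (pvGetA ev "arquivo") "")))
      let trecho := pvOrStr (pvGetA ev "trecho") (pvOrStr (pvGetA ev "text")
                     (pvOrStr (pvGetA ev "excerpt") (pvOrStr (pvGetA ev "fragmento") "")))
      let obs := pvOrStr (pvGetA ev "observacao") (pvOrStr (pvGetA ev "note")
                     (pvOrStr (pvGetA ev "comentario") (pvOrStr (pvGetA ev "why") "")))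
      -- `str(x) if x is not None else ""`: x is already a non-None string here, str is the identity
      out ++ [[("fonte", fonte), ("trecho", trecho), ("observacao", obs)]])
    []

-- ===== PORT B =====
-- module-level _PRIO: inverted priority index key -> (field, rank)
def pvPrio : PySem.Dict String (String × Nat) :=
  PySem.Dict.mk
    [("fonte", ("fonte", 0)), ("source", ("fonte", 1)), ("ref", ("fonte", 2)), ("arquivo", ("fonte", 3)),
     ("trecho", ("trecho", 0)), ("text", ("trecho", 1)), ("excerpt", ("trecho", 2)), ("fragmento", ("trecho", 3)),
     ("observacao", ("observacao", 0)), ("note", ("observacao", 1)), ("comentario", ("observacao", 2)), ("why", ("observacao", 3))]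

-- ev.items(): the entries of the dict the association list denotes — the first
-- occurrence of each key, matching the convention's first-match lookup
def pvItems : List (String × String) → List (String × String)
  | [] => []
  | p :: rest => p :: pvItems (rest.filter (fun q => ¬ (q.1 = p.1)))
termination_by l => l.length
decreasing_by
  simp only [List.length_unattach]
  exact Nat.lt_succ_of_le (le_trans (List.length_filter_le _ _) (Nat.le_of_eq List.length_attach))

-- body of B's inner `for k, v in ev.items()` loop
def pvStep (best : PySem.Dict String (Nat × String)) (kv : String × String) : PySem.Dict String (Nat × String) :=
  match pvPrio.get? kv.1 with
  | none => best
  | some fr =>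
    if kv.2 = "" then best
    else
      match best.get? fr.1 with
      | none => best.insert fr.1 (fr.2, kv.2)   -- str(v) on a string is the identity
      | some cur => if fr.2 < cur.1 then best.insert fr.1 (fr.2, kv.2) else best

-- `best[f][1] if f in best else ""`
def pvDflt (s : Option (Nat × String)) : String :=
  match s with | none => "" | some c => c.2

def normalize_evidencias_py_alt (evs : List (List (String × String))) : List (List (String × String)) :=
  evs.map (fun ev =>
    let best := (pvItems ev).foldl pvStep PySem.Dict.empty
    ["fonte", "trecho", "observacao"].map (fun f => (f, pvDflt (best.get? f))))

-- ===== PRECONDITION & SPEC =====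
def Spec_normalize_evidencias_py (evs : List (List (String × String))) (out : List (List (String × String))) : Prop := out = normalize_evidencias_py_alt evs
instance (evs : List (List (String × String))) (out : List (List (String × String))) : Decidable (Spec_normalize_evidencias_py evs out) := by unfold Spec_normalize_evidencias_py; infer_instance

-- ===== CLAIM (what is proved, stated in full; the proofs are below) =====
def Claim_equal_normalize_evidencias_py : Prop := ∀ (evs : List (List (String × String))), Dom_normalize_evidencias_py evs → Spec_normalize_evidencias_py evs (normalize_evidencias_py evs)

-- ===== LEMMAS AND PROOFS =====

theorem pvItems_subset_aux : ∀ (n : Nat) (l : List (String × String)), l.length ≤ n →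
    ∀ q, q ∈ pvItems l → q ∈ l := by
  intro n
  induction n with
  | zero =>
    intro l hl q h
    rw [List.eq_nil_of_length_eq_zero (Nat.le_zero.mp hl)] at h ⊢
    simpa [pvItems] using h
  | succ n ih =>
    intro l hl q h
    match l with
    | [] => simp [pvItems] at h
    | p :: rest =>
      rw [pvItems] at h
      rcases List.mem_cons.mp h with h | h
      · exact h ▸ List.mem_cons_self
      · exact List.mem_cons_of_mem _ (List.mem_of_mem_filter
          (ih _ (le_trans (List.length_filter_le _ _) (Nat.le_of_succ_le_succ (by simpa using hl))) q h))

theorem pvItems_nodup_aux : ∀ (n : Nat) (l : List (String × String)), l.length ≤ n →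
    ((pvItems l).map Prod.fst).Nodup := by
  intro n
  induction n with
  | zero =>
    intro l hl
    rw [List.eq_nil_of_length_eq_zero (Nat.le_zero.mp hl)]
    simp [pvItems]
  | succ n ih =>
    intro l hl
    match l with
    | [] => simp [pvItems]
    | p :: rest =>
      rw [pvItems, List.map_cons, List.nodup_cons]
      refine ⟨?_, ih _ (le_trans (List.length_filter_le _ _) (Nat.le_of_succ_le_succ (by simpa using hl)))⟩
      intro hmem
      obtain ⟨q, hq, hq1⟩ := List.mem_map.mp hmem
      have := List.of_mem_filter (pvItems_subset_aux _ _ le_rfl q hq)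
      simp [hq1] at this

theorem get?_mk_filter_ne (l : List (String × String)) (a k : String) (hne : ¬ (a = k)) :
    (PySem.Dict.mk (l.filter (fun q => ¬ (q.1 = a)))).get? k = (PySem.Dict.mk l).get? k := by
  induction l with
  | nil => rfl
  | cons p rest ih =>
    by_cases hp : p.1 = a
    · rw [show (p :: rest).filter (fun q => ¬ (q.1 = a)) = rest.filter (fun q => ¬ (q.1 = a))
            from by simp [List.filter_cons, hp]]
      rw [ih, PySem.Dict.get?_mk_cons]
      have hpk : (p.1 == k) = false := by simp [hp]; exact hne
      simp [hpk]
    · rw [show (p :: rest).filter (fun q => ¬ (q.1 = a)) = p :: rest.filter (fun q => ¬ (q.1 = a))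
            from by simp [List.filter_cons, hp]]
      rw [PySem.Dict.get?_mk_cons, PySem.Dict.get?_mk_cons, ih]

theorem pvItems_get?_aux : ∀ (n : Nat) (l : List (String × String)), l.length ≤ n →
    ∀ k, (PySem.Dict.mk (pvItems l)).get? k = (PySem.Dict.mk l).get? k := by
  intro n
  induction n with
  | zero =>
    intro l hl k
    rw [List.eq_nil_of_length_eq_zero (Nat.le_zero.mp hl), pvItems]
  | succ n ih =>
    intro l hl k
    match l with
    | [] => rw [pvItems]
    | p :: rest =>
      obtain ⟨k1, v1⟩ := p
      rw [pvItems]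
      simp only [PySem.Dict.get?_mk_cons]
      by_cases hk : k1 == k
      · simp [hk]
      · simp only [hk, Bool.false_eq_true, if_false]
        rw [ih _ (le_trans (List.length_filter_le _ _) (Nat.le_of_succ_le_succ (by simpa using hl)))]
        exact get?_mk_filter_ne _ _ _ (by simpa using fun h => (by simp [h] at hk))

def pvRel (f k : String) : Option Nat :=
  match pvPrio.get? k with
  | some fr => if fr.1 = f then some fr.2 else none
  | none => none

def pvSStep (f : String) (s : Option (Nat × String)) (kv : String × String) : Option (Nat × String) :=
  match pvRel f kv.1 with
  | none => s
  | some r =>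
    if kv.2 = "" then s
    else
      match s with
      | none => some (r, kv.2)
      | some c => if r < c.1 then some (r, kv.2) else s

theorem pvStepGet (f : String) (d : PySem.Dict String (Nat × String)) (kv : String × String) :
    (pvStep d kv).get? f = pvSStep f (d.get? f) kv := by
  unfold pvStep pvSStep pvRel
  cases hpk : pvPrio.get? kv.1 with
  | none => rfl
  | some fr =>
    by_cases hv : kv.2 = ""
    · simp only [hv, if_true, if_pos rfl]
      split <;> rfl
    · simp only [hv, if_false]
      by_cases hf : fr.1 = f
      · subst hf
        cases hc : d.get? fr.1 with
        | none => simp [hc, PySem.Dict.get?_insert_self]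
        | some cur =>
          by_cases hlt : fr.2 < cur.1
          · simp [hc, hlt, PySem.Dict.get?_insert_self]
          · simp [hc, hlt]
      · have hne : f ≠ fr.1 := fun h => hf h.symm
        cases hc : d.get? fr.1 with
        | none => simp [hc, hf, PySem.Dict.get?_insert_of_ne _ _ hne]
        | some cur =>
          by_cases hlt : fr.2 < cur.1
          · simp [hc, hf, hlt, PySem.Dict.get?_insert_of_ne _ _ hne]
          · simp [hc, hf, hlt]

theorem pvProj (f : String) (l : List (String × String)) (d : PySem.Dict String (Nat × String)) :
    ((l.foldl pvStep d).get? f) = l.foldl (pvSStep f) (d.get? f) := by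
  induction l generalizing d with
  | nil => rfl
  | cons kv l' ih => rw [List.foldl_cons, List.foldl_cons, ih, pvStepGet]

def pvChain (ks : List String) (l : List (String × String)) (dflt : String) : String :=
  ks.foldr (fun k acc => pvOrStr ((PySem.Dict.mk l).get? k) acc) dflt

def pvRank (ks : List String) (s : Option (Nat × String)) : Nat :=
  match s with | none => ks.length | some c => c.1

theorem pvChain_nil (ks : List String) (d : String) : pvChain ks [] d = d := by
  induction ks with
  | nil => rfl
  | cons k ks ih => simp [pvChain, pvOrStr, PySem.Dict.get?, ih]

theorem pvChain_append (as bs : List String) (l : List (String × String)) (d : String) :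
    pvChain (as ++ bs) l d = pvChain as l (pvChain bs l d) := by
  simp [pvChain, List.foldr_append]

theorem pvChain_cons_notmem {k : String} {ks : List String} (hk : k ∉ ks)
    (v : String) (l : List (String × String)) (d : String) :
    pvChain ks ((k, v) :: l) d = pvChain ks l d := by
  induction ks with
  | nil => rfl
  | cons k' ks ih =>
    have hne : ¬ (k == k') := by simp; exact fun h => hk (h ▸ List.mem_cons_self)
    simp only [pvChain, List.foldr_cons] at ih ⊢
    rw [PySem.Dict.get?_mk_cons, if_neg (by simpa using hne), ih (fun h => hk (List.mem_cons_of_mem _ h))]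

theorem pvChain_cons_empty {k : String} {l : List (String × String)}
    (hk : k ∉ l.map Prod.fst) (ks : List String) (d : String) :
    pvChain ks ((k, "") :: l) d = pvChain ks l d := by
  induction ks with
  | nil => rfl
  | cons k' ks ih =>
    simp only [pvChain, List.foldr_cons] at ih ⊢
    rw [PySem.Dict.get?_mk_cons, ih]
    by_cases hkk : k == k'
    · have hkeq : k = k' := by simpa using hkk
      have hnone : (PySem.Dict.mk l).get? k' = none := by
        rw [PySem.Dict.get?_eq_none_iff_not_mem_keys]
        simpa [PySem.Dict.keys, ← hkeq] using hk
      rw [if_pos hkk, hnone]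
      simp [pvOrStr]
    · rw [if_neg (by simpa using hkk)]

theorem pvTakeNotMem {ks : List String} (hnd : ks.Nodup) {r m : Nat} (hr : r < ks.length)
    (hm : m ≤ r) : ks[r] ∉ ks.take m := by
  intro hmem
  obtain ⟨j, hj, hje⟩ := List.getElem_of_mem hmem
  have hjr : j < r := lt_of_lt_of_le (lt_of_lt_of_le hj (by simp [List.length_take])) hm
  have : ks[j] = ks[r] := by simpa [List.getElem_take] using hje
  exact absurd ((List.Nodup.getElem_inj_iff hnd).mp this) (Nat.ne_of_lt hjr)

theorem pvMain (f : String) (ks : List String) (hnd : ks.Nodup)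
    (h1 : ∀ k r, pvRel f k = some r → ks[r]? = some k)
    (h2 : ∀ j, (hj : j < ks.length) → pvRel f (ks[j]) = some j) :
    ∀ (l : List (String × String)), (l.map Prod.fst).Nodup →
    ∀ (s : Option (Nat × String)),
    pvDflt (l.foldl (pvSStep f) s) = pvChain (ks.take (pvRank ks s)) l (pvDflt s) := by
  intro l
  induction l with
  | nil => intro _ s; rw [List.foldl_nil, pvChain_nil]
  | cons kv l' ih =>
    intro hl s
    obtain ⟨k, v⟩ := kv
    have hl' : (l'.map Prod.fst).Nodup := (List.nodup_cons.mp (by simpa using hl)).2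
    have hknot : k ∉ l'.map Prod.fst := (List.nodup_cons.mp (by simpa using hl)).1
    rw [List.foldl_cons]
    cases hrel : pvRel f k with
    | none =>
      have hks : k ∉ ks := by
        intro hm
        obtain ⟨j, hj, hje⟩ := List.getElem_of_mem hm
        rw [← hje, h2 j hj] at hrel
        simp at hrel
      have hstep : pvSStep f s (k, v) = s := by simp [pvSStep, hrel]
      rw [hstep, ih hl' s, pvChain_cons_notmem (fun h => hks (List.mem_of_mem_take h))]
    | some r =>
      have hkr : ks[r]? = some k := h1 k r hrel
      have hrlen : r < ks.length := by
        by_contra h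
        rw [List.getElem?_eq_none (le_of_not_gt h)] at hkr
        simp at hkr
      have hkget : ks[r] = k := by simpa [List.getElem?_eq_getElem hrlen] using hkr
      by_cases hv : v = ""
      · subst hv
        have hstep : pvSStep f s (k, "") = s := by
          simp [pvSStep, hrel]
        rw [hstep, ih hl' s, pvChain_cons_empty hknot]
      · by_cases hlt : r < pvRank ks s
        · have hstep : pvSStep f s (k, v) = some (r, v) := by
            cases s with
            | none => simp [pvSStep, hrel, hv]
            | some c => simp [pvSStep, hrel, hv, show r < c.1 from hlt]
          rw [hstep, ih hl' (some (r, v))]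
          have hm : r < (ks.take (pvRank ks s)).length := by
            simp only [List.length_take]
            omega
          have heq : ks.take (pvRank ks s) =
              ks.take r ++ ks[r] :: ((ks.take (pvRank ks s)).drop (r + 1)) := by
            conv_lhs => rw [← List.take_append_drop r (ks.take (pvRank ks s))]
            rw [List.take_take, min_eq_left (le_of_lt hlt), List.drop_eq_getElem_cons hm,
              List.getElem_take]
          rw [heq, pvChain_append]
          have hinner : pvChain (ks[r] :: ((ks.take (pvRank ks s)).drop (r + 1)))
              ((k, v) :: l') (pvDflt s) = v := by
            simp only [pvChain, List.foldr_cons, hkget, PySem.Dict.get?_mk_cons]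
            rw [if_pos (by simp)]
            simp [pvOrStr, hv]
          rw [hinner, pvChain_cons_notmem (hkget ▸ pvTakeNotMem hnd hrlen le_rfl)]
          rfl
        · have hstep : pvSStep f s (k, v) = s := by
            cases s with
            | none => exact absurd (by simpa [pvRank] using hrlen) hlt
            | some c => simp [pvSStep, hrel, hv, show ¬ r < c.1 by simpa [pvRank] using hlt]
          rw [hstep, ih hl' s,
            pvChain_cons_notmem (hkget ▸ pvTakeNotMem hnd hrlen (le_of_not_gt hlt))]

theorem pvItems_nodup (l : List (String × String)) : ((pvItems l).map Prod.fst).Nodup :=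
  pvItems_nodup_aux l.length l le_rfl

theorem pvItems_get? (l : List (String × String)) (k : String) :
    (PySem.Dict.mk (pvItems l)).get? k = (PySem.Dict.mk l).get? k :=
  pvItems_get?_aux l.length l le_rfl k

theorem pvChain_items (ks : List String) (l : List (String × String)) (d : String) :
    pvChain ks (pvItems l) d = pvChain ks l d := by
  induction ks with
  | nil => rfl
  | cons k ks ih =>
    simp only [pvChain, List.foldr_cons] at ih ⊢
    rw [pvItems_get?, ih]

theorem pvRel_some {f k : String} {r : Nat} (h : pvRel f k = some r) :
    pvPrio.get? k = some (f, r) := by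
  unfold pvRel at h
  cases hg : pvPrio.get? k with
  | none => rw [hg] at h; simp at h
  | some fr =>
    rw [hg] at h
    dsimp only at h
    by_cases hf : fr.1 = f
    · rw [if_pos hf] at h
      obtain rfl := Option.some_inj.mp h
      rw [← hf]
    · simp [hf] at h

theorem pvGet?_mem {ps : List (String × (String × Nat))} {k : String} {v : String × Nat}
    (h : (PySem.Dict.mk ps).get? k = some v) : (k, v) ∈ ps := by
  induction ps with
  | nil => simp [PySem.Dict.get?] at h
  | cons p rest ih =>
    obtain ⟨a, b⟩ := p
    rw [PySem.Dict.get?_mk_cons] at h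
    by_cases hak : a == k
    · rw [if_pos hak] at h
      obtain rfl := Option.some_inj.mp h
      exact (by simpa using hak : a = k) ▸ List.mem_cons_self
    · rw [if_neg hak] at h
      exact List.mem_cons_of_mem _ (ih h)

theorem pvH1_fonte : ∀ (k : String) (r : Nat), pvRel "fonte" k = some r →
    (["fonte", "source", "ref", "arquivo"] : List String)[r]? = some k := by
  intro k r h
  have hm := pvGet?_mem (pvRel_some h)
  simp only [List.mem_cons, List.not_mem_nil, or_false, Prod.mk.injEq] at hm
  rcases hm with ⟨rfl, -, rfl⟩ | ⟨rfl, -, rfl⟩ | ⟨rfl, -, rfl⟩ | ⟨rfl, -, rfl⟩ |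
    ⟨-, h, -⟩ | ⟨-, h, -⟩ | ⟨-, h, -⟩ | ⟨-, h, -⟩ | ⟨-, h, -⟩ | ⟨-, h, -⟩ | ⟨-, h, -⟩ | ⟨-, h, -⟩ <;>
    first | rfl | exact absurd h (by decide)

theorem pvH1_trecho : ∀ (k : String) (r : Nat), pvRel "trecho" k = some r →
    (["trecho", "text", "excerpt", "fragmento"] : List String)[r]? = some k := by
  intro k r h
  have hm := pvGet?_mem (pvRel_some h)
  simp only [List.mem_cons, List.not_mem_nil, or_false, Prod.mk.injEq] at hm
  rcases hm with ⟨-, h, -⟩ | ⟨-, h, -⟩ | ⟨-, h, -⟩ | ⟨-, h, -⟩ |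
    ⟨rfl, -, rfl⟩ | ⟨rfl, -, rfl⟩ | ⟨rfl, -, rfl⟩ | ⟨rfl, -, rfl⟩ |
    ⟨-, h, -⟩ | ⟨-, h, -⟩ | ⟨-, h, -⟩ | ⟨-, h, -⟩ <;>
    first | rfl | exact absurd h (by decide)

theorem pvH1_obs : ∀ (k : String) (r : Nat), pvRel "observacao" k = some r →
    (["observacao", "note", "comentario", "why"] : List String)[r]? = some k := by
  intro k r h
  have hm := pvGet?_mem (pvRel_some h)
  simp only [List.mem_cons, List.not_mem_nil, or_false, Prod.mk.injEq] at hm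
  rcases hm with ⟨-, h, -⟩ | ⟨-, h, -⟩ | ⟨-, h, -⟩ | ⟨-, h, -⟩ |
    ⟨-, h, -⟩ | ⟨-, h, -⟩ | ⟨-, h, -⟩ | ⟨-, h, -⟩ |
    ⟨rfl, -, rfl⟩ | ⟨rfl, -, rfl⟩ | ⟨rfl, -, rfl⟩ | ⟨rfl, -, rfl⟩ <;>
    first | rfl | exact absurd h (by decide)

theorem pvField (f : String) (ks : List String) (hnd : ks.Nodup)
    (h1 : ∀ k r, pvRel f k = some r → ks[r]? = some k)
    (h2 : ∀ j, (hj : j < ks.length) → pvRel f (ks[j]) = some j)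
    (ev : List (String × String)) :
    pvDflt (((pvItems ev).foldl pvStep PySem.Dict.empty).get? f) = pvChain ks ev "" := by
  rw [pvProj]
  rw [show (PySem.Dict.empty : PySem.Dict String (Nat × String)).get? f = none from rfl]
  rw [pvMain f ks hnd h1 h2 (pvItems ev) (pvItems_nodup ev) none]
  show pvChain (ks.take ks.length) (pvItems ev) "" = _
  rw [List.take_length, pvChain_items]

-- ===== VERDICT (by name: the statement is the Claim_ definition above) =====
theorem normalize_evidencias_py_spec : Claim_equal_normalize_evidencias_py := by
  intro evs _
  unfold Spec_normalize_evidencias_py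
  unfold normalize_evidencias_py normalize_evidencias_py_alt
  rw [PySem.List.foldl_append_singleton_eq_map]
  simp only [List.nil_append]
  refine List.map_congr_left (fun ev _ => ?_)
  simp only [List.map_cons, List.map_nil]
  show [("fonte", pvChain ["fonte", "source", "ref", "arquivo"] ev ""),
        ("trecho", pvChain ["trecho", "text", "excerpt", "fragmento"] ev ""),
        ("observacao", pvChain ["observacao", "note", "comentario", "why"] ev "")]
     = [("fonte", pvDflt (((pvItems ev).foldl pvStep PySem.Dict.empty).get? "fonte")),
        ("trecho", pvDflt (((pvItems ev).foldl pvStep PySem.Dict.empty).get? "trecho")),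
        ("observacao", pvDflt (((pvItems ev).foldl pvStep PySem.Dict.empty).get? "observacao"))]
  rw [pvField "fonte" ["fonte", "source", "ref", "arquivo"] (by decide) pvH1_fonte
        (by decide) ev,
      pvField "trecho" ["trecho", "text", "excerpt", "fragmento"] (by decide) pvH1_trecho
        (by decide) ev,
      pvField "observacao" ["observacao", "note", "comentario", "why"] (by decide) pvH1_obs
        (by decide) ev]
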